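-- pv_equiv track=rewrite | github.com/woletee/1D_ARC | src/backend/generate.py | padded_fill
-- ===== SOURCE A (Python) =====
-- def padded_fill(input_list):
--     output_list = input_list.copy()
--     start_index = None
--     for i, num in enumerate(input_list):
--         if num != 0:
--             if start_index is not None:
--                 for j in range(start_index + 1, i):
--                     output_list[j] = input_list[start_index]
--                 start_index = None
--             else:
--                 start_index = i
--     return output_list
-- ===== SOURCE B (Python) =====
-- def padded_fill(input_list):
--     output_list = input_list.copy()
--     nz = [i for i, v in enumerate(input_list) if v != 0]
--     k = 0
--     while k + 1 < len(nz):
--         a, b = nz[k], nz[k + 1]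
--         for j in range(a + 1, b):
--             output_list[j] = input_list[a]
--         k += 2
--     return output_list
-- ===== Notes on version B (the rewrite author's own statement) =====
-- stated objective: alternative
-- what changed: Replaces the single-pass flag state machine with a two-phase decomposition: first collect all non-zero indices, then walk that index list two at a time filling each gap.
import Mathlib
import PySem

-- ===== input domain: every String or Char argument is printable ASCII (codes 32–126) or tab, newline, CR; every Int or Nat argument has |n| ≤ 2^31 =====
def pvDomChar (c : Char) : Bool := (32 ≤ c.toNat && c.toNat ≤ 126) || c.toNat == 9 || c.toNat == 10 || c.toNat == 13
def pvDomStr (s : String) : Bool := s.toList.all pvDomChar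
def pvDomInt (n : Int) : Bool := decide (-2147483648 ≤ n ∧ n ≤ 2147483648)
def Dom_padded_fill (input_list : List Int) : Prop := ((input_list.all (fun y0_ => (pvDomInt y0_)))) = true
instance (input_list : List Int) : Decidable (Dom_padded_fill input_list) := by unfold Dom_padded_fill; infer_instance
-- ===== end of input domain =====

-- B replaces A's single-pass flag state machine by a two-phase decomposition (collect
-- non-zero indices, then pair-walk them filling each gap); same cost, different structure.

-- ===== PORT A =====
-- inner loop `for j in range(s+1, i): output[j] = input[s]`; shared by both ports
-- because both Pythons contain this identical inner loop.
def pvFillRange (out : List Int) (a b : Nat) (v : Int) : List Int :=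
  ((List.range (b - a)).map (· + a)).foldl (fun o j => o.set j v) out

-- the `for i, num in enumerate(input_list)` loop with state (output_list, start_index)
def pvLoopA (inp : List Int) : List Int → Nat → List Int → Option Nat → List Int
  | [], _, out, _ => out
  | num :: rest, i, out, st =>
    if num ≠ 0 then
      match st with
      | some s => pvLoopA inp rest (i + 1) (pvFillRange out (s + 1) i (inp.getD s 0)) none
      | none => pvLoopA inp rest (i + 1) out (some i)
    else pvLoopA inp rest (i + 1) out st

def padded_fill (input_list : List Int) : List Int :=
  pvLoopA input_list input_list 0 input_list none

-- ===== PORT B =====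
-- `[i for i, v in enumerate(input_list) if v != 0]`
def pvNzIdx : List Int → Nat → List Nat
  | [], _ => []
  | v :: rest, i => if v ≠ 0 then i :: pvNzIdx rest (i + 1) else pvNzIdx rest (i + 1)

-- `while k + 1 < len(nz): a, b = nz[k], nz[k+1]; fill; k += 2`
def pvFillPairs (inp : List Int) : List Nat → List Int → List Int
  | a :: b :: rest, out => pvFillPairs inp rest (pvFillRange out (a + 1) b (inp.getD a 0))
  | _, out => out

def padded_fill_alt (input_list : List Int) : List Int :=
  pvFillPairs input_list (pvNzIdx input_list 0) input_list

-- ===== PRECONDITION & SPEC =====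
def Spec_padded_fill (input_list : List Int) (out : List Int) : Prop := out = padded_fill_alt input_list
instance (input_list : List Int) (out : List Int) : Decidable (Spec_padded_fill input_list out) := by unfold Spec_padded_fill; infer_instance

-- ===== CLAIM (what is proved, stated in full; the proofs are below) =====
def Claim_equal_padded_fill : Prop := ∀ (input_list : List Int), Dom_padded_fill input_list → Spec_padded_fill input_list (padded_fill input_list)

-- ===== LEMMAS AND PROOFS =====
-- prepend the dangling start index (if any) to the pending non-zero index list
def pvStCons (st : Option Nat) (l : List Nat) : List Nat :=
  match st with
  | some s => s :: l
  | none => l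

theorem pvLoopA_eq_fillPairs (inp : List Int) :
    ∀ (rest : List Int) (i : Nat) (out : List Int) (st : Option Nat),
      pvLoopA inp rest i out st = pvFillPairs inp (pvStCons st (pvNzIdx rest i)) out := by
  intro rest
  induction rest with
  | nil =>
    intro i out st
    cases st <;> simp [pvLoopA, pvNzIdx, pvStCons, pvFillPairs]
  | cons num tail ih =>
    intro i out st
    by_cases h : num = 0
    · cases st <;> simp [pvLoopA, pvNzIdx, pvStCons, h, ih]
    · cases st with
      | none =>
        simp [pvLoopA, pvNzIdx, h, ih, pvStCons]
      | some s =>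
        simp [pvLoopA, pvNzIdx, h, ih, pvStCons, pvFillPairs]

-- ===== VERDICT (by name: the statement is the Claim_ definition above) =====
theorem padded_fill_spec : Claim_equal_padded_fill := by
  intro input_list _
  unfold Spec_padded_fill padded_fill padded_fill_alt
  simpa [pvStCons] using pvLoopA_eq_fillPairs input_list input_list 0 input_list none
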